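-- pv_equiv track=rewrite | github.com/sidneiali/base_django | panel/tests/e2e_pages/base.py | xpath_literal
-- ===== SOURCE A (Python) =====
-- def xpath_literal(value: str) -> str:
--     if "'" not in value:
--         return f"'{value}'"
--     if '"' not in value:
--         return f'"{value}"'
--     parts = value.split("'")
--     tokens: list[str] = []
--     for index, part in enumerate(parts):
--         if part:
--             tokens.append(f"'{part}'")
--         if index < len(parts) - 1:
--             tokens.append('"\'"')
--     return f"concat({', '.join(tokens)})"
-- ===== SOURCE B (Python) =====
-- def xpath_literal(value: str) -> str:
--     if "'" not in value:
--         return f"'{value}'"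
--     if '"' not in value:
--         return f'"{value}"'
--     tokens: list[str] = []
--     buf = ""
--     for ch in value:
--         if ch == "'":
--             if buf:
--                 tokens.append(f"'{buf}'")
--                 buf = ""
--             tokens.append('"\'"')
--         else:
--             buf += ch
--     if buf:
--         tokens.append(f"'{buf}'")
--     return f"concat({', '.join(tokens)})"
-- ===== Notes on version B (the rewrite author's own statement) =====
-- stated objective: alternative
-- what changed: The concat branch no longer splits the string and indexes over enumerated parts; it makes a single character scan with a buffer accumulator, flushing the buffer as a quoted token at each single quote (and at the end) and emitting the separator token per quote.
import Mathlib
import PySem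

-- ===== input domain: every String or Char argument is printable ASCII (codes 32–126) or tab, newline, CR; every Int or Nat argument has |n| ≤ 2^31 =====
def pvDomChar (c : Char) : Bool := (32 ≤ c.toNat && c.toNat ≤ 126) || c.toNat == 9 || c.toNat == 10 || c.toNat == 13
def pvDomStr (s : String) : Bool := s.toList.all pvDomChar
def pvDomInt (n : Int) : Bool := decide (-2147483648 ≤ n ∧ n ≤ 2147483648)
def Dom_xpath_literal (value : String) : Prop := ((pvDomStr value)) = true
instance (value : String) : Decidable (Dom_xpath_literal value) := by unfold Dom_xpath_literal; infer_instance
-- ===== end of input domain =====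

-- B replaces A's split/enumerate concat branch by a single character scan with a buffer accumulator (alternative decomposition, same cost); return value only, no mutation.

-- ===== PORT A =====
def xpath_literal (value : String) : String :=
  if ¬ (PySem.Str.isIn "'" value) then
    String.ofList ('\'' :: value.toList ++ ['\''])
  else if ¬ (PySem.Str.isIn "\"" value) then
    String.ofList ('"' :: value.toList ++ ['"'])
  else
    let parts := PySem.Chars.splitOn value.toList ['\'']
    let tokens := (PySem.List.enumerate parts 0).foldl (fun toks ip =>
      let toks := if ip.2 ≠ [] then toks ++ ['\'' :: ip.2 ++ ['\'']] else toks
      if ip.1 < (parts.length : Int) - 1 then toks ++ [['"', '\'', '"']] else toks) []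
    String.ofList ("concat(".toList ++ PySem.Chars.join [',', ' '] tokens ++ [')'])

-- ===== PORT B =====
def xpath_literal_alt (value : String) : String :=
  if ¬ (PySem.Str.isIn "'" value) then
    String.ofList ('\'' :: value.toList ++ ['\''])
  else if ¬ (PySem.Str.isIn "\"" value) then
    String.ofList ('"' :: value.toList ++ ['"'])
  else
    let st := value.toList.foldl (fun (st : List (List Char) × List Char) ch =>
      if ch = '\'' then
        ((if st.2 ≠ [] then st.1 ++ ['\'' :: st.2 ++ ['\'']] else st.1) ++ [['"', '\'', '"']], [])
      else (st.1, st.2 ++ [ch])) ([], [])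
    let tokens := if st.2 ≠ [] then st.1 ++ ['\'' :: st.2 ++ ['\'']] else st.1
    String.ofList ("concat(".toList ++ PySem.Chars.join [',', ' '] tokens ++ [')'])

-- ===== PRECONDITION & SPEC =====
def Spec_xpath_literal (value : String) (out : String) : Prop := out = xpath_literal_alt value
instance (value : String) (out : String) : Decidable (Spec_xpath_literal value out) := by unfold Spec_xpath_literal; infer_instance

-- ===== CLAIM (what is proved, stated in full; the proofs are below) =====
def Claim_equal_xpath_literal : Prop := ∀ (value : String), Dom_xpath_literal value → Spec_xpath_literal value (xpath_literal value)

-- ===== LEMMAS AND PROOFS =====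

/-- One token `'b'` if the buffer/part is non-empty, else nothing. -/
def pvFlush (b : List Char) : List (List Char) :=
  if b ≠ [] then ['\'' :: b ++ ['\'']] else []

/-- Python's `value.split("'")` as a plain structural recursion, with the pending piece `pre`. -/
def pvSplitQ (pre : List Char) : List Char → List (List Char)
  | [] => [pre]
  | c :: rest => if c = '\'' then pre :: pvSplitQ [] rest else pvSplitQ (pre ++ [c]) rest

/-- A's token list from the part list: quoted non-empty parts, separator between parts. -/
def pvToks : List (List Char) → List (List Char)
  | [] => []
  | [p] => pvFlush p
  | p :: q :: ps => pvFlush p ++ [['"', '\'', '"']] ++ pvToks (q :: ps)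

/-- B's scan, as a structural recursion on the remaining characters. -/
def pvScan (buf : List Char) : List Char → List (List Char)
  | [] => pvFlush buf
  | c :: rest => if c = '\'' then pvFlush buf ++ [['"', '\'', '"']] ++ pvScan [] rest
                 else pvScan (buf ++ [c]) rest

theorem pvSplitQ_ne_nil (pre : List Char) (cs : List Char) : pvSplitQ pre cs ≠ [] := by
  induction cs generalizing pre with
  | nil => simp [pvSplitQ]
  | cons c rest ih => by_cases h : c = '\'' <;> simp [pvSplitQ, h, ih]

theorem splitOn_go_eq (fuel : Nat) :
    ∀ (l cur : List Char) (acc : List (List Char)), l.length < fuel →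
      PySem.Chars.splitOn.go ['\''] fuel l cur acc = acc.reverse ++ pvSplitQ cur.reverse l := by
  induction fuel with
  | zero => intro l cur acc h; omega
  | succ fuel ih =>
    intro l cur acc h
    cases l with
    | nil => simp [PySem.Chars.splitOn.go, pvSplitQ]
    | cons c rest =>
      by_cases hc : c = '\''
      · subst hc
        have : PySem.Chars.splitOn.go ['\''] (fuel + 1) ('\'' :: rest) cur acc
            = PySem.Chars.splitOn.go ['\''] fuel rest [] (cur.reverse :: acc) := by
          simp [PySem.Chars.splitOn.go, List.isPrefixOf]
        rw [this, ih rest [] (cur.reverse :: acc) (by simpa using Nat.lt_of_succ_lt_succ h)]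
        simp [pvSplitQ]
      · have : PySem.Chars.splitOn.go ['\''] (fuel + 1) (c :: rest) cur acc
            = PySem.Chars.splitOn.go ['\''] fuel rest (c :: cur) acc := by
          simp [PySem.Chars.splitOn.go, List.isPrefixOf]
          exact fun h => absurd h.symm hc
        rw [this, ih rest (c :: cur) acc (by simpa using Nat.lt_of_succ_lt_succ h)]
        simp [pvSplitQ, hc]

theorem splitOn_eq_pvSplitQ (cs : List Char) :
    PySem.Chars.splitOn cs ['\''] = pvSplitQ [] cs := by
  have := splitOn_go_eq (cs.length + 1) cs [] [] (by omega)
  simpa [PySem.Chars.splitOn] using this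

theorem pvToks_pvSplitQ (cs : List Char) : ∀ buf, pvToks (pvSplitQ buf cs) = pvScan buf cs := by
  induction cs with
  | nil => intro buf; simp [pvSplitQ, pvToks, pvScan]
  | cons c rest ih =>
    intro buf
    by_cases hc : c = '\''
    · subst hc
      obtain ⟨r, rs, hr⟩ : ∃ r rs, pvSplitQ ([] : List Char) rest = r :: rs := by
        cases h : pvSplitQ ([] : List Char) rest with
        | nil => exact absurd h (pvSplitQ_ne_nil [] rest)
        | cons r rs => exact ⟨r, rs, rfl⟩
      have h1 : pvSplitQ buf ('\'' :: rest) = buf :: pvSplitQ [] rest := by simp [pvSplitQ]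
      have h2 : pvScan buf ('\'' :: rest)
          = pvFlush buf ++ [['"', '\'', '"']] ++ pvScan [] rest := by simp [pvScan]
      rw [h1, h2, hr]
      simp only [pvToks]
      rw [← hr, ih]
    · simp only [pvSplitQ, pvScan, if_neg hc]
      exact ih (buf ++ [c])

theorem foldA (N : Int) :
    ∀ (parts : List (List Char)) (s : Int) (acc : List (List Char)),
      s + parts.length = N + 1 →
      (PySem.List.enumerate parts s).foldl (fun toks ip =>
        let toks := if ip.2 ≠ [] then toks ++ ['\'' :: ip.2 ++ ['\'']] else toks
        if ip.1 < N then toks ++ [['"', '\'', '"']] else toks) acc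
      = acc ++ pvToks parts := by
  intro parts
  induction parts with
  | nil => intro s acc h; simp [PySem.List.enumerate_nil, pvToks]
  | cons p ps ih =>
    intro s acc h
    rw [PySem.List.enumerate_cons]
    cases ps with
    | nil =>
      have hs : ¬ (s < N) := by simp at h; omega
      simp only [List.foldl_cons, List.foldl_nil, PySem.List.enumerate_nil, if_neg hs]
      by_cases hp : p = [] <;> simp [pvToks, pvFlush, hp]
    | cons q qs =>
      have hs : s < N := by simp at h; omega
      have h' : (s + 1) + ((q :: qs).length : Int) = N + 1 := by
        simp at h ⊢; push_cast at h ⊢; omega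
      simp only [List.foldl_cons, if_pos hs]
      rw [ih (s + 1) _ h']
      by_cases hp : p = [] <;> simp [pvToks, pvFlush, hp]

theorem foldB (cs : List Char) :
    ∀ (toks : List (List Char)) (buf : List Char),
      (let st := cs.foldl (fun (st : List (List Char) × List Char) ch =>
        if ch = '\'' then
          ((if st.2 ≠ [] then st.1 ++ ['\'' :: st.2 ++ ['\'']] else st.1) ++ [['"', '\'', '"']], [])
        else (st.1, st.2 ++ [ch])) (toks, buf)
       if st.2 ≠ [] then st.1 ++ ['\'' :: st.2 ++ ['\'']] else st.1)
      = toks ++ pvScan buf cs := by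
  induction cs with
  | nil =>
    intro toks buf
    by_cases hb : buf = [] <;> simp [pvScan, pvFlush, hb]
  | cons c rest ih =>
    intro toks buf
    by_cases hc : c = '\''
    · subst hc
      simp only [List.foldl_cons]
      rw [ih]
      by_cases hb : buf = [] <;> simp [pvScan, pvFlush, hb]
    · simp only [List.foldl_cons, if_neg hc]
      rw [ih]
      simp [pvScan, hc]

-- ===== VERDICT (by name: the statement is the Claim_ definition above) =====
theorem concat_branch_eq (cs : List Char) :
    String.ofList ("concat(".toList ++ PySem.Chars.join [',', ' ']
      ((PySem.List.enumerate (PySem.Chars.splitOn cs ['\''])).foldl (fun toks ip =>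
        let toks := if ip.2 ≠ [] then toks ++ ['\'' :: ip.2 ++ ['\'']] else toks
        if ip.1 < ((PySem.Chars.splitOn cs ['\'']).length : Int) - 1 then
          toks ++ [['"', '\'', '"']] else toks) []) ++ [')'])
    = String.ofList ("concat(".toList ++ PySem.Chars.join [',', ' ']
        (let st := cs.foldl (fun (st : List (List Char) × List Char) ch =>
          if ch = '\'' then
            ((if st.2 ≠ [] then st.1 ++ ['\'' :: st.2 ++ ['\'']] else st.1) ++ [['"', '\'', '"']], [])
          else (st.1, st.2 ++ [ch])) ([], [])
         if st.2 ≠ [] then st.1 ++ ['\'' :: st.2 ++ ['\'']] else st.1) ++ [')']) := by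
  rw [foldA (((PySem.Chars.splitOn cs ['\'']).length : Int) - 1)
        (PySem.Chars.splitOn cs ['\'']) 0 [] (by omega),
      foldB cs [] []]
  rw [List.nil_append, List.nil_append, splitOn_eq_pvSplitQ, pvToks_pvSplitQ]

theorem xpath_literal_spec : Claim_equal_xpath_literal := by
  intro value _
  unfold Spec_xpath_literal xpath_literal xpath_literal_alt
  split_ifs
  · exact concat_branch_eq value.toList
  · rfl
  · rfl
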